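-- pv_equiv track=rewrite | github.com/Creed-Space/METTLE | mettle/vcp.py | compute_tier
-- ===== SOURCE A (Python) =====
-- SUITE_ORDER: dict[str, int] = {
--     "adversarial": 1,
--     "native": 2,
--     "self-reference": 3,
--     "social": 4,
--     "inverse-turing": 5,
--     "anti-thrall": 6,
--     "agency": 7,
--     "counter-coaching": 8,
--     "intent-provenance": 9,
--     "novel-reasoning": 10,
-- }
--
-- TIER_RANGES: dict[str, tuple[int, int]] = {
--     "bronze": (1, 5),
--     "silver": (1, 7),
--     "gold": (1, 9),
--     "platinum": (1, 10),
-- }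
--
-- def compute_tier(suites_passed: list[str]) -> str:
--     """Compute METTLE verification tier from suites passed.
--
--     Tier assignment is suite-based, not percentage-based:
--         Bronze:   suites 1-5 all pass
--         Silver:   suites 1-7 all pass
--         Gold:     suites 1-9 all pass
--         Platinum: suites 1-10 all pass
--
--     Any suite failure below the tier's range drops the tier.
--     E.g., pass suites 1-9 but fail suite 6 -> Bronze (not Silver).
--
--     Args:
--         suites_passed: List of suite names that passed.
--
--     Returns:
--         Tier string: "platinum", "gold", "silver", "bronze", or "none".
--     """
--     passed_numbers = {SUITE_ORDER[s] for s in suites_passed if s in SUITE_ORDER}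
--
--     # Check tiers from highest to lowest
--     for tier in ("platinum", "gold", "silver", "bronze"):
--         lo, hi = TIER_RANGES[tier]
--         required = set(range(lo, hi + 1))
--         if required <= passed_numbers:
--             return tier
--
--     return "none"
-- ===== SOURCE B (Python) =====
-- SUITE_ORDER: dict[str, int] = {
--     "adversarial": 1,
--     "native": 2,
--     "self-reference": 3,
--     "social": 4,
--     "inverse-turing": 5,
--     "anti-thrall": 6,
--     "agency": 7,
--     "counter-coaching": 8,
--     "intent-provenance": 9,
--     "novel-reasoning": 10,
-- }
--
--
-- def compute_tier(suites_passed: list[str]) -> str: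
--     """Compute METTLE verification tier via the longest consecutive prefix of passed suites."""
--     passed_numbers = {SUITE_ORDER[s] for s in suites_passed if s in SUITE_ORDER}
--     p = 0
--     for i in range(1, 11):
--         if i in passed_numbers:
--             p = i
--         else:
--             break
--     if p >= 10:
--         return "platinum"
--     if p >= 9:
--         return "gold"
--     if p >= 7:
--         return "silver"
--     if p >= 5:
--         return "bronze"
--     return "none"
-- ===== Notes on version B (the rewrite author's own statement) =====
-- stated objective: simpler
-- what changed: Replaces the four per-tier subset checks over TIER_RANGES with a single scan computing the longest consecutive prefix of passed suite numbers, then a threshold cascade (>=10 platinum, >=9 gold, >=7 silver, >=5 bronze).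
import Mathlib
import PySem

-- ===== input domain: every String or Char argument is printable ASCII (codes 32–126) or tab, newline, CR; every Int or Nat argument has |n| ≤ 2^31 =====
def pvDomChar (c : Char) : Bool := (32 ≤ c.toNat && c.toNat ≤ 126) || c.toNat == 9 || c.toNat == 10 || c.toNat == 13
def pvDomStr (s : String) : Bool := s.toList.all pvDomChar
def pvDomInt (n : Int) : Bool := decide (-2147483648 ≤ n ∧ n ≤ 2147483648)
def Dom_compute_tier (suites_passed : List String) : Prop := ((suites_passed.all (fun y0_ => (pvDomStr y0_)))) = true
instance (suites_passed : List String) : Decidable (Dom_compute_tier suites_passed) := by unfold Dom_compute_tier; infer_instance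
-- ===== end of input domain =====

-- B replaces the four per-tier subset checks by one longest-consecutive-prefix scan plus a threshold cascade (simpler).

-- ===== PORT A =====
def pySUITE_ORDER : PySem.Dict String Int :=
  PySem.Dict.ofList [("adversarial", 1), ("native", 2), ("self-reference", 3), ("social", 4),
   ("inverse-turing", 5), ("anti-thrall", 6), ("agency", 7), ("counter-coaching", 8),
   ("intent-provenance", 9), ("novel-reasoning", 10)]

def pyTIER_RANGES : PySem.Dict String (Int × Int) :=
  PySem.Dict.ofList [("bronze", (1, 5)), ("silver", (1, 7)), ("gold", (1, 9)), ("platinum", (1, 10))]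

-- the 'for tier in (...)' loop with its early return
def tierLoop (passed : PySem.Set Int) : List String → String
  | [] => "none"
  | t :: rest =>
      let r := PySem.Dict.getD pyTIER_RANGES t (0, 0)
      let required : PySem.Set Int := PySem.Set.ofList (PySem.List.pyRange r.1 (r.2 + 1) 1)
      if PySem.Set.issubset required passed then t else tierLoop passed rest

def compute_tier (suites_passed : List String) : String :=
  let passed_numbers : PySem.Set Int :=
    PySem.Set.ofList
      ((suites_passed.filter (fun s => (PySem.Dict.get? pySUITE_ORDER s).isSome)).map
        (fun s => PySem.Dict.getD pySUITE_ORDER s 0))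
  tierLoop passed_numbers ["platinum", "gold", "silver", "bronze"]

-- ===== PORT B =====
-- 'for i in range(1, 11): if i in passed: p = i else: break'
def prefixLoop (passed : PySem.Set Int) : List Int → Int → Int
  | [], p => p
  | i :: rest, p => if PySem.Set.contains passed i then prefixLoop passed rest i else p

def compute_tier_alt (suites_passed : List String) : String :=
  let passed_numbers : PySem.Set Int :=
    PySem.Set.ofList
      ((suites_passed.filter (fun s => (PySem.Dict.get? pySUITE_ORDER s).isSome)).map
        (fun s => PySem.Dict.getD pySUITE_ORDER s 0))
  let p := prefixLoop passed_numbers (PySem.List.pyRange 1 11 1) 0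
  if p ≥ 10 then "platinum"
  else if p ≥ 9 then "gold"
  else if p ≥ 7 then "silver"
  else if p ≥ 5 then "bronze"
  else "none"

-- ===== PRECONDITION & SPEC =====
def Spec_compute_tier (suites_passed : List String) (out : String) : Prop := out = compute_tier_alt suites_passed
instance (suites_passed : List String) (out : String) : Decidable (Spec_compute_tier suites_passed out) := by unfold Spec_compute_tier; infer_instance

-- ===== CLAIM (what is proved, stated in full; the proofs are below) =====
def Claim_equal_compute_tier : Prop := ∀ (suites_passed : List String), Dom_compute_tier suites_passed → Spec_compute_tier suites_passed (compute_tier suites_passed)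

-- ===== LEMMAS AND PROOFS =====

-- both programs are the same function of the ten membership bits of the passed set
theorem tier_agree (S : PySem.Set Int) :
    tierLoop S ["platinum", "gold", "silver", "bronze"] =
      (let p := prefixLoop S (PySem.List.pyRange 1 11 1) 0
       if p ≥ 10 then "platinum"
       else if p ≥ 9 then "gold"
       else if p ≥ 7 then "silver"
       else if p ≥ 5 then "bronze"
       else "none") := by
  have hr : PySem.List.pyRange 1 11 1 = [1,2,3,4,5,6,7,8,9,10] := by decide
  have hp : PySem.Dict.getD pyTIER_RANGES "platinum" ((0 : Int), (0 : Int)) = (1, 10) := by decide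
  have hg : PySem.Dict.getD pyTIER_RANGES "gold" ((0 : Int), (0 : Int)) = (1, 9) := by decide
  have hs : PySem.Dict.getD pyTIER_RANGES "silver" ((0 : Int), (0 : Int)) = (1, 7) := by decide
  have hb : PySem.Dict.getD pyTIER_RANGES "bronze" ((0 : Int), (0 : Int)) = (1, 5) := by decide
  have r10 : (PySem.Set.ofList (PySem.List.pyRange 1 (10 + 1) 1) : PySem.Set Int) = [1,2,3,4,5,6,7,8,9,10] := by decide
  have r9 : (PySem.Set.ofList (PySem.List.pyRange 1 (9 + 1) 1) : PySem.Set Int) = [1,2,3,4,5,6,7,8,9] := by decide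
  have r7 : (PySem.Set.ofList (PySem.List.pyRange 1 (7 + 1) 1) : PySem.Set Int) = [1,2,3,4,5,6,7] := by decide
  have r5 : (PySem.Set.ofList (PySem.List.pyRange 1 (5 + 1) 1) : PySem.Set Int) = [1,2,3,4,5] := by decide
  simp only [tierLoop, prefixLoop, hr, hp, hg, hs, hb, r10, r9, r7, r5,
    PySem.Set.issubset, PySem.Set.contains, List.all_cons, List.all_nil]
  generalize (List.contains S (1 : Int)) = b1
  generalize (List.contains S (2 : Int)) = b2
  generalize (List.contains S (3 : Int)) = b3
  generalize (List.contains S (4 : Int)) = b4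
  generalize (List.contains S (5 : Int)) = b5
  generalize (List.contains S (6 : Int)) = b6
  generalize (List.contains S (7 : Int)) = b7
  generalize (List.contains S (8 : Int)) = b8
  generalize (List.contains S (9 : Int)) = b9
  generalize (List.contains S (10 : Int)) = b10
  revert b1 b2 b3 b4 b5 b6 b7 b8 b9 b10
  decide

-- ===== VERDICT (by name: the statement is the Claim_ definition above) =====
theorem compute_tier_spec : Claim_equal_compute_tier := by
  intro suites_passed _
  unfold Spec_compute_tier compute_tier compute_tier_alt
  exact tier_agree _
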